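-- pv_equiv track=rewrite | github.com/Spiritumx/rag | innovation_experiments/evaluate_v2/M_core_tot.py | _truncate_at_action
-- ===== SOURCE A (Python) =====
-- def _truncate_at_action(text: str) -> str:
--     """Physical truncation to prevent LLM hallucination."""
--     lines = text.split('\n')
--     truncated_lines = []
--     found_action = False
--
--     for line in lines:
--         truncated_lines.append(line)
--         if "Action:" in line:
--             found_action = True
--             break
--
--     if found_action:
--         return "\n".join(truncated_lines)
--     return text
-- ===== SOURCE B (Python) =====
-- def _truncate_at_action(text: str) -> str:
--     """Physical truncation to prevent LLM hallucination."""
--     p = text.find("Action:")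
--     if p == -1:
--         return text
--     q = text.find("\n", p)
--     return text if q == -1 else text[:q]
-- ===== Notes on version B (the rewrite author's own statement) =====
-- stated objective: simpler
-- what changed: Replaces splitting into a line list, an accumulating loop and a join with two str.find calls and one slice off the original string.
import Mathlib
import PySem

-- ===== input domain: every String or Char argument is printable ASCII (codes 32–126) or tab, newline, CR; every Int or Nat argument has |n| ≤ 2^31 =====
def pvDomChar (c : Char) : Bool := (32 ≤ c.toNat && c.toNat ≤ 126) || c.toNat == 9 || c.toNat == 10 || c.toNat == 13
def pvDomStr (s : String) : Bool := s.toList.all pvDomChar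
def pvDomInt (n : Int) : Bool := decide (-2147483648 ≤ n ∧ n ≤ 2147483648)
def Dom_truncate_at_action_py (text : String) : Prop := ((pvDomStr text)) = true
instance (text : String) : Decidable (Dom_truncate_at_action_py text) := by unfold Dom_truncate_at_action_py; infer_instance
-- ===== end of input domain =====

-- B replaces A's split-into-lines + accumulate-and-join loop by two find calls and one slice
-- of the original string (same result, no line list); objective: simpler.

-- ===== PORT A =====
-- the for-loop over the lines with the found_action flag: 'some acc' = flag set, 'none' = flag never set
def pvLoopA : List (List Char) → List (List Char) → Option (List (List Char))
  | [], _ => none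
  | line :: rest, acc =>
      if PySem.Chars.isIn "Action:".toList line then some (acc ++ [line])
      else pvLoopA rest (acc ++ [line])

def truncate_at_action_py (text : String) : String :=
  let lines := PySem.Chars.splitOn text.toList "\n".toList
  match pvLoopA lines [] with
  | some truncated => String.ofList (PySem.Chars.join "\n".toList truncated)
  | none => text

-- ===== PORT B =====
def truncate_at_action_py_alt (text : String) : String :=
  let p := PySem.Str.find text "Action:"
  if p = -1 then text
  else
    let q := PySem.Str.findFrom text "\n" p
    if q = -1 then text
    else String.ofList (PySem.Chars.slice text.toList none (some q))

-- ===== PRECONDITION & SPEC =====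
def Spec_truncate_at_action_py (text : String) (out : String) : Prop := out = truncate_at_action_py_alt text
instance (text : String) (out : String) : Decidable (Spec_truncate_at_action_py text out) := by unfold Spec_truncate_at_action_py; infer_instance

-- ===== CLAIM (what is proved, stated in full; the proofs are below) =====
def Claim_equal_truncate_at_action_py : Prop := ∀ (text : String), Dom_truncate_at_action_py text → Spec_truncate_at_action_py text (truncate_at_action_py text)

-- ===== LEMMAS AND PROOFS =====

lemma pvNl : ("\n".toList : List Char) = ['\n'] := rfl

-- list-level versions of the two ports
def pvListA (cs : List Char) : List Char :=
  match pvLoopA (PySem.Chars.splitOn cs "\n".toList) [] with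
  | some truncated => PySem.Chars.join "\n".toList truncated
  | none => cs

def pvListB (cs : List Char) : List Char :=
  if PySem.Chars.find cs "Action:".toList = -1 then cs
  else if PySem.Chars.findFrom cs "\n".toList (PySem.Chars.find cs "Action:".toList) = -1 then cs
  else PySem.Chars.slice cs none
    (some (PySem.Chars.findFrom cs "\n".toList (PySem.Chars.find cs "Action:".toList)))

lemma portA_toList (text : String) :
    (truncate_at_action_py text).toList = pvListA text.toList := by
  unfold truncate_at_action_py pvListA
  cases h : pvLoopA (PySem.Chars.splitOn text.toList "\n".toList) [] with
  | none => simp only [h]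
  | some t => simp only [h]; simp

lemma portB_toList (text : String) :
    (truncate_at_action_py_alt text).toList = pvListB text.toList := by
  unfold truncate_at_action_py_alt pvListB
  simp only [PySem.Str.find_eq, PySem.Str.findFrom_eq]
  split_ifs <;> simp

-- a simple structural description of splitting on '\n' (pre = piece collected so far)
def pvSplitNl : List Char → List Char → List (List Char)
  | pre, [] => [pre]
  | pre, c :: rest => if c = '\n' then pre :: pvSplitNl [] rest else pvSplitNl (pre ++ [c]) rest

lemma pvGo_eq (fuel : Nat) : ∀ (l cur : List Char) (acc : List (List Char)),
    l.length ≤ fuel →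
    PySem.Chars.splitOn.go ['\n'] fuel l cur acc = acc.reverse ++ pvSplitNl cur.reverse l := by
  induction fuel with
  | zero =>
    intro l cur acc h
    have hl : l = [] := by cases l with | nil => rfl | cons a b => simp at h
    subst hl
    simp [PySem.Chars.splitOn.go, pvSplitNl]
  | succ fuel ih =>
    intro l cur acc h
    cases l with
    | nil => simp [PySem.Chars.splitOn.go, pvSplitNl]
    | cons c rest =>
      by_cases hc : c = '\n'
      · subst hc
        have hpre : (['\n'] : List Char).isPrefixOf ('\n' :: rest) = true := by
          simp [List.isPrefixOf]
        simp only [PySem.Chars.splitOn.go, hpre, if_true]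
        rw [show List.drop (['\n'] : List Char).length ('\n' :: rest) = rest from rfl]
        rw [ih rest [] (cur.reverse :: acc) (by simpa using Nat.le_of_succ_le_succ h)]
        simp [pvSplitNl]
      · have hpre : (['\n'] : List Char).isPrefixOf (c :: rest) = false := by
          simp [List.isPrefixOf]
          exact fun hcc => hc hcc.symm
        simp only [PySem.Chars.splitOn.go, hpre]
        rw [if_neg (by simp)]
        rw [ih rest (c :: cur) acc (by simpa using Nat.le_of_succ_le_succ h)]
        simp [pvSplitNl, hc]

lemma pvSplitOn_eq (cs : List Char) :
    PySem.Chars.splitOn cs "\n".toList = pvSplitNl [] cs := by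
  show PySem.Chars.splitOn cs ['\n'] = pvSplitNl [] cs
  unfold PySem.Chars.splitOn
  rw [pvGo_eq (cs.length + 1) cs [] [] (by omega)]
  rfl

lemma pvSplitNl_no (cs : List Char) : ∀ pre, '\n' ∉ cs → pvSplitNl pre cs = [pre ++ cs] := by
  induction cs with
  | nil => intro pre _; simp [pvSplitNl]
  | cons c rest ih =>
    intro pre h
    have hc : ¬ (c = '\n') := by intro hc; exact h (by simp [hc])
    have hrest : '\n' ∉ rest := fun hm => h (by simp [hm])
    simp only [pvSplitNl, if_neg hc]
    rw [ih _ hrest]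
    simp

lemma pvSplitNl_app (l : List Char) : ∀ pre rest, '\n' ∉ l →
    pvSplitNl pre (l ++ '\n' :: rest) = (pre ++ l) :: pvSplitNl [] rest := by
  induction l with
  | nil => intro pre rest _; simp [pvSplitNl]
  | cons c l' ih =>
    intro pre rest h
    have hc : ¬ (c = '\n') := by intro hc; exact h (by simp [hc])
    have hl' : '\n' ∉ l' := fun hm => h (by simp [hm])
    simp only [List.cons_append, pvSplitNl, if_neg hc]
    rw [ih _ _ hl']
    simp

lemma pvLoopA_shift (ls : List (List Char)) : ∀ acc,
    pvLoopA ls acc = (pvLoopA ls []).map (acc ++ ·) := by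
  induction ls with
  | nil => intro acc; simp [pvLoopA]
  | cons line rest ih =>
    intro acc
    simp only [pvLoopA]
    by_cases h : PySem.Chars.isIn "Action:".toList line = true
    · rw [if_pos h, if_pos h]; simp
    · rw [if_neg h, if_neg h]
      rw [ih (acc ++ [line]), ih ([] ++ [line])]
      cases pvLoopA rest [] <;> simp

lemma pvLoopA_some_ne_nil (ls : List (List Char)) : ∀ acc t,
    pvLoopA ls acc = some t → t ≠ [] := by
  induction ls with
  | nil => intro acc t h; simp [pvLoopA] at h
  | cons line rest ih =>
    intro acc t h
    simp only [pvLoopA] at h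
    by_cases hi : PySem.Chars.isIn "Action:".toList line = true
    · rw [if_pos hi] at h
      injection h with h2
      subst h2
      simp
    · rw [if_neg hi] at h
      exact ih _ _ h

lemma pvInfix_iff_drop (sub s : List Char) : sub <:+: s ↔ ∃ j : Nat, sub <+: s.drop j := by
  rw [← PySem.Chars.isIn_iff_infix]
  exact (PySem.Chars.exists_prefix_drop_iff_isIn sub s).symm

lemma pvFind_eq_of (s sub : List Char) (k : Nat) (h1 : sub <+: s.drop k)
    (h2 : ∀ i : Nat, i < k → ¬ sub <+: s.drop i) : PySem.Chars.find s sub = (k : Int) := by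
  have hinf : sub <:+: s := (pvInfix_iff_drop sub s).mpr ⟨k, h1⟩
  have h0 : 0 ≤ PySem.Chars.find s sub := (PySem.Chars.find_nonneg_iff s sub).mpr hinf
  obtain ⟨hp, hmin⟩ := PySem.Chars.find_spec h0
  rcases lt_trichotomy (PySem.Chars.find s sub).toNat k with h | h | h
  · exact absurd hp (h2 _ h)
  · omega
  · exact absurd h1 (hmin k h)

lemma pvDrop1 (l rest : List Char) (i : Nat) (hi : i ≤ l.length) :
    (l ++ '\n' :: rest).drop i = l.drop i ++ '\n' :: rest := by
  rw [List.drop_append]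
  have h0 : i - l.length = 0 := by omega
  simp [h0]

lemma pvDrop2 (l rest : List Char) (j : Nat) :
    (l ++ '\n' :: rest).drop (l.length + 1 + j) = rest.drop j := by
  rw [List.drop_append]
  have h1 : l.drop (l.length + 1 + j) = [] := List.drop_eq_nil_of_le (by omega)
  have h2 : l.length + 1 + j - l.length = j + 1 := by omega
  simp [h1, h2]

lemma pvTake2 (l rest : List Char) (m : Nat) :
    (l ++ '\n' :: rest).take (l.length + 1 + m) = l ++ '\n' :: rest.take m := by
  rw [List.take_append]
  have h1 : l.take (l.length + 1 + m) = l := List.take_of_length_le (by omega)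
  have h2 : l.length + 1 + m - l.length = m + 1 := by omega
  simp [h1, h2]

lemma pvFind_nl (u v : List Char) (hu : '\n' ∉ u) :
    PySem.Chars.find (u ++ '\n' :: v) "\n".toList = (u.length : Int) := by
  show PySem.Chars.find (u ++ '\n' :: v) ['\n'] = (u.length : Int)
  apply pvFind_eq_of
  · rw [pvDrop1 u v u.length le_rfl]
    simp
  · intro i hi hpre
    rw [pvDrop1 u v i (by omega)] at hpre
    obtain ⟨t, ht⟩ := hpre
    rw [List.drop_eq_getElem_cons hi] at ht
    simp only [List.cons_append] at ht
    have : '\n' = u[i] := (List.cons.injEq _ _ _ _).mp ht |>.1 |>.symm ▸ rfl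
    have hmem : u[i] ∈ u := List.getElem_mem hi
    rw [← this] at hmem
    exact hu hmem

lemma pvOcc_split (l rest sub : List Char) (hnn : '\n' ∉ sub) (i : Nat)
    (h : sub <+: (l ++ '\n' :: rest).drop i) :
    (i + sub.length ≤ l.length ∧ sub <+: l.drop i) ∨
    (l.length + 1 ≤ i ∧ sub <+: rest.drop (i - (l.length + 1))) := by
  by_cases hi : i ≤ l.length
  · rw [pvDrop1 l rest i hi] at h
    by_cases hlen : sub.length ≤ l.length - i
    · left
      refine ⟨by omega, ?_⟩
      have hs := List.prefix_iff_eq_take.mp h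
      have htake : (l.drop i ++ '\n' :: rest).take sub.length = (l.drop i).take sub.length := by
        rw [List.take_append]
        have h0 : sub.length - (l.drop i).length = 0 := by
          simp only [List.length_drop]; omega
        rw [h0]; simp
      have hpfx := List.take_prefix sub.length (l.drop i)
      rwa [← htake, ← hs] at hpfx
    · exfalso
      have hs := List.prefix_iff_eq_take.mp h
      have hld : (l.drop i).length ≤ sub.length := by simp only [List.length_drop]; omega
      have hdecomp : sub = l.drop i ++ ('\n' :: rest).take (sub.length - (l.drop i).length) := by
        conv_lhs => rw [hs]
        rw [List.take_append, List.take_of_length_le hld]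
      have hpos : sub.length - (l.drop i).length = (sub.length - (l.drop i).length - 1) + 1 := by
        simp only [List.length_drop]; omega
      have hmem : '\n' ∈ sub := by
        rw [hdecomp, hpos, List.take_succ_cons]; simp
      exact hnn hmem
  · right
    have hi' : l.length + 1 ≤ i := by omega
    refine ⟨hi', ?_⟩
    have hdec := pvDrop2 l rest (i - (l.length + 1))
    rw [show l.length + 1 + (i - (l.length + 1)) = i from by omega] at hdec
    rw [hdec] at h
    exact h

lemma pvOcc_in_l (l rest sub : List Char) (i : Nat) (hi : i ≤ l.length)
    (h : sub <+: l.drop i) : sub <+: (l ++ '\n' :: rest).drop i := by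
  rw [pvDrop1 l rest i hi]
  exact h.trans (List.prefix_append _ _)

lemma pvOcc_in_rest (l rest sub : List Char) (j : Nat) (h : sub <+: rest.drop j) :
    sub <+: (l ++ '\n' :: rest).drop (l.length + 1 + j) := by
  rw [pvDrop2]; exact h

lemma pvFind_skip (l rest sub : List Char) (hnn : '\n' ∉ sub)
    (hnot : ¬ sub <:+: l) (hr : sub <:+: rest) :
    PySem.Chars.find (l ++ '\n' :: rest) sub = (l.length : Int) + 1 + PySem.Chars.find rest sub := by
  have h0 : 0 ≤ PySem.Chars.find rest sub := (PySem.Chars.find_nonneg_iff rest sub).mpr hr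
  obtain ⟨hp, hmin⟩ := PySem.Chars.find_spec h0
  have heq : PySem.Chars.find (l ++ '\n' :: rest) sub
      = ((l.length + 1 + (PySem.Chars.find rest sub).toNat : Nat) : Int) := by
    apply pvFind_eq_of
    · exact pvOcc_in_rest l rest sub _ hp
    · intro i hi hcon
      rcases pvOcc_split l rest sub hnn i hcon with ⟨_, hpl⟩ | ⟨hge, hpr⟩
      · exact hnot ((pvInfix_iff_drop sub l).mpr ⟨i, hpl⟩)
      · exact hmin (i - (l.length + 1)) (by omega) hpr
  rw [heq]; push_cast; omega

lemma pvFind_in_l (l rest sub : List Char) (hnn : '\n' ∉ sub) (hs : sub ≠ [])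
    (hin : sub <:+: l) :
    ∃ k : Nat, PySem.Chars.find (l ++ '\n' :: rest) sub = (k : Int) ∧ k + sub.length ≤ l.length := by
  obtain ⟨i0, hi0⟩ := (pvInfix_iff_drop sub l).mp hin
  have hi0le : i0 ≤ l.length := by
    by_contra hgt
    have : l.drop i0 = [] := List.drop_eq_nil_of_le (by omega)
    rw [this] at hi0
    exact hs (List.prefix_nil.mp hi0)
  have hocc : sub <+: (l ++ '\n' :: rest).drop i0 := pvOcc_in_l l rest sub i0 hi0le hi0
  have h0 : 0 ≤ PySem.Chars.find (l ++ '\n' :: rest) sub :=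
    (PySem.Chars.find_nonneg_iff _ _).mpr ((pvInfix_iff_drop _ _).mpr ⟨i0, hocc⟩)
  obtain ⟨hp, hmin⟩ := PySem.Chars.find_spec h0
  have hk : (PySem.Chars.find (l ++ '\n' :: rest) sub).toNat ≤ i0 := by
    by_contra hgt
    exact hmin i0 (by omega) hocc
  rcases pvOcc_split l rest sub hnn _ hp with ⟨hb, _⟩ | ⟨hb, _⟩
  · exact ⟨_, by omega, hb⟩
  · omega

lemma pvFirstLine (cs : List Char) (h : '\n' ∈ cs) :
    ∃ l rest, cs = l ++ '\n' :: rest ∧ '\n' ∉ l := by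
  induction cs with
  | nil => simp at h
  | cons a cs' ih =>
    by_cases ha : a = '\n'
    · exact ⟨[], cs', by simp [ha], by simp⟩
    · have hmem' : '\n' ∈ cs' := by
        rcases List.mem_cons.mp h with h1 | h1
        · exact absurd h1.symm ha
        · exact h1
      obtain ⟨l, rest, hcs, hl⟩ := ih hmem'
      refine ⟨a :: l, rest, by rw [hcs]; rfl, ?_⟩
      intro hm
      rcases List.mem_cons.mp hm with h1 | h1
      · exact ha h1.symm
      · exact hl h1

lemma pvSub_facts : ('\n' ∉ "Action:".toList) ∧ ("Action:".toList ≠ []) := by decide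

theorem pvMain (cs : List Char) : pvListA cs = pvListB cs := by
  by_cases hmem : '\n' ∈ cs
  · obtain ⟨l, rest, hcs, hl⟩ := pvFirstLine cs hmem
    have ih : pvListA rest = pvListB rest := pvMain rest
    subst hcs
    have hnn := pvSub_facts.1
    have hs := pvSub_facts.2
    have hsplit : PySem.Chars.splitOn (l ++ '\n' :: rest) "\n".toList
        = l :: PySem.Chars.splitOn rest "\n".toList := by
      rw [pvSplitOn_eq, pvSplitOn_eq, pvSplitNl_app l [] rest hl]
      simp
    by_cases hal : PySem.Chars.isIn "Action:".toList l = true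
    -- first line contains "Action:"
    · have hA : pvListA (l ++ '\n' :: rest) = l := by
        unfold pvListA
        rw [hsplit]
        simp only [pvLoopA, List.nil_append]
        rw [if_pos hal]
        exact PySem.Chars.join_singleton _ _
      have hinl : "Action:".toList <:+: l := (PySem.Chars.isIn_iff_infix _ _).mp hal
      obtain ⟨k, hk, hkb⟩ := pvFind_in_l l rest _ hnn hs hinl
      have hsublen : 0 < ("Action:".toList).length := by decide
      have hkl : k ≤ l.length := by omega
      have hkcs : k ≤ (l ++ '\n' :: rest).length := by simp; omega
      have hnd : '\n' ∉ l.drop k := fun hm => hl (List.drop_subset _ _ hm)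
      have hB : pvListB (l ++ '\n' :: rest) = l := by
        unfold pvListB
        simp only [hk]
        rw [if_neg (by omega)]
        rw [PySem.Chars.findFrom_natCast _ _ k hkcs]
        rw [pvDrop1 l rest k hkl]
        rw [pvFind_nl _ _ hnd]
        rw [if_neg (by omega)]
        rw [if_neg (by omega)]
        rw [show (k : Int) + ((l.drop k).length : Int) = ((l.length : Nat) : Int) from by
          simp only [List.length_drop]; omega]
        rw [PySem.Chars.slice_eq_listSlice, PySem.List.slice_to_natCast]
        rw [List.take_append]
        simp
      rw [hA, hB]
    -- first line does not contain "Action:"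
    · have hninl : ¬ "Action:".toList <:+: l := fun hc => hal ((PySem.Chars.isIn_iff_infix _ _).mpr hc)
      have hA : pvListA (l ++ '\n' :: rest) = l ++ '\n' :: pvListA rest := by
        unfold pvListA
        rw [hsplit]
        simp only [pvLoopA, List.nil_append]
        rw [if_neg hal]
        rw [pvLoopA_shift _ [l]]
        cases hres : pvLoopA (PySem.Chars.splitOn rest "\n".toList) [] with
        | none => simp
        | some t =>
          have hne := pvLoopA_some_ne_nil _ _ _ hres
          cases t with
          | nil => exact absurd rfl hne
          | cons b t' =>
            simp only [Option.map_some]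
            rw [show ([l] ++ b :: t') = l :: b :: t' from rfl]
            rw [PySem.Chars.join_cons_cons]
            simp [pvNl]
      by_cases hfr : "Action:".toList <:+: rest
      -- "Action:" occurs in the rest, after the first newline
      · obtain ⟨prn, hpr⟩ : ∃ n : Nat, PySem.Chars.find rest "Action:".toList = (n : Int) := by
          have h0r : 0 ≤ PySem.Chars.find rest "Action:".toList :=
            (PySem.Chars.find_nonneg_iff _ _).mpr hfr
          exact ⟨(PySem.Chars.find rest "Action:".toList).toNat, by omega⟩
        have hprle := PySem.Chars.find_le_length rest "Action:".toList
        have hprn : prn ≤ rest.length := by omega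
        have hfcs : PySem.Chars.find (l ++ '\n' :: rest) "Action:".toList
            = ((l.length + 1 + prn : Nat) : Int) := by
          rw [pvFind_skip l rest _ hnn hninl hfr, hpr]; push_cast; omega
        have hB : pvListB (l ++ '\n' :: rest) = l ++ '\n' :: pvListB rest := by
          unfold pvListB
          rw [hfcs, hpr]
          by_cases hf : PySem.Chars.find (rest.drop prn) "\n".toList = -1
          · have hcsFF : PySem.Chars.findFrom (l ++ '\n' :: rest) "\n".toList
                ((l.length + 1 + prn : Nat) : Int) = -1 := by
              rw [PySem.Chars.findFrom_natCast (l ++ '\n' :: rest) "\n".toList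
                (l.length + 1 + prn) (by simp; omega)]
              rw [pvDrop2, if_pos hf]
            have hrestFF : PySem.Chars.findFrom rest "\n".toList ((prn : Nat) : Int) = -1 := by
              rw [PySem.Chars.findFrom_natCast rest "\n".toList prn hprn]
              rw [if_pos hf]
            rw [hcsFF, hrestFF]
            rw [if_neg (by omega)]
            rw [if_pos (show ((-1 : Int) = -1) from rfl)]
            rw [if_neg (by omega)]
            rw [if_pos (show ((-1 : Int) = -1) from rfl)]
          · have hfge := PySem.Chars.neg_one_le_find (rest.drop prn) "\n".toList
            obtain ⟨fn, hfn⟩ : ∃ n : Nat, PySem.Chars.find (rest.drop prn) "\n".toList = (n : Int) :=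
              ⟨(PySem.Chars.find (rest.drop prn) "\n".toList).toNat, by omega⟩
            have hcsFF : PySem.Chars.findFrom (l ++ '\n' :: rest) "\n".toList
                ((l.length + 1 + prn : Nat) : Int) = ((l.length + 1 + (prn + fn) : Nat) : Int) := by
              rw [PySem.Chars.findFrom_natCast (l ++ '\n' :: rest) "\n".toList
                (l.length + 1 + prn) (by simp; omega)]
              rw [pvDrop2, if_neg hf, hfn]
              push_cast
              ring
            have hrestFF : PySem.Chars.findFrom rest "\n".toList ((prn : Nat) : Int)
                = ((prn + fn : Nat) : Int) := by
              rw [PySem.Chars.findFrom_natCast rest "\n".toList prn hprn]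
              rw [if_neg hf, hfn]
              push_cast
              ring
            rw [hcsFF, hrestFF]
            rw [if_neg (by omega)]
            rw [if_neg (by omega)]
            rw [if_neg (by omega)]
            rw [if_neg (by omega)]
            rw [PySem.Chars.slice_eq_listSlice, PySem.Chars.slice_eq_listSlice]
            rw [PySem.List.slice_to_natCast, PySem.List.slice_to_natCast]
            rw [pvTake2]
        rw [hA, hB, ih]
      -- "Action:" occurs nowhere
      · have hncs : ¬ "Action:".toList <:+: (l ++ '\n' :: rest) := by
          intro hinf
          obtain ⟨j, hj⟩ := (pvInfix_iff_drop _ _).mp hinf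
          rcases pvOcc_split l rest _ hnn j hj with ⟨_, hpl⟩ | ⟨_, hpr⟩
          · exact hninl ((pvInfix_iff_drop _ _).mpr ⟨j, hpl⟩)
          · exact hfr ((pvInfix_iff_drop _ _).mpr ⟨_, hpr⟩)
        have hB : pvListB (l ++ '\n' :: rest) = l ++ '\n' :: pvListB rest := by
          unfold pvListB
          rw [if_pos ((PySem.Chars.find_eq_neg_one_iff _ _).mpr hncs)]
          rw [if_pos ((PySem.Chars.find_eq_neg_one_iff _ _).mpr hfr)]
        rw [hA, hB, ih]
  -- no newline at all: a single line; both return the text unchanged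
  · have hA : pvListA cs = cs := by
      unfold pvListA
      rw [pvSplitOn_eq, pvSplitNl_no cs [] hmem]
      simp only [List.nil_append, pvLoopA]
      by_cases h : PySem.Chars.isIn "Action:".toList cs = true
      · rw [if_pos h]
        exact PySem.Chars.join_singleton _ _
      · rw [if_neg h]
    have hB : pvListB cs = cs := by
      unfold pvListB
      by_cases hf : PySem.Chars.find cs "Action:".toList = -1
      · rw [if_pos hf]
      · rw [if_neg hf]
        have hge := PySem.Chars.neg_one_le_find cs "Action:".toList
        have hle := PySem.Chars.find_le_length cs "Action:".toList
        obtain ⟨k, hkeq⟩ : ∃ k : Nat, PySem.Chars.find cs "Action:".toList = (k : Int) :=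
          ⟨(PySem.Chars.find cs "Action:".toList).toNat, by omega⟩
        have hinner : PySem.Chars.find (cs.drop k) "\n".toList = -1 := by
          rw [PySem.Chars.find_eq_neg_one_iff]
          intro hinf
          have h1 : '\n' ∈ cs.drop k := hinf.subset (by simp [pvNl])
          exact hmem (List.drop_subset _ _ h1)
        have hFF : PySem.Chars.findFrom cs "\n".toList ((k : Nat) : Int) = -1 := by
          rw [PySem.Chars.findFrom_natCast _ _ _ (by omega)]
          rw [if_pos hinner]
        simp only [hkeq, hFF]
        simp
    rw [hA, hB]
termination_by cs.length
decreasing_by simp [hcs]; omega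

-- ===== VERDICT (by name: the statement is the Claim_ definition above) =====
theorem truncate_at_action_py_spec : Claim_equal_truncate_at_action_py := by
  unfold Claim_equal_truncate_at_action_py
  intro text _
  unfold Spec_truncate_at_action_py
  have h := (portA_toList text).trans ((pvMain text.toList).trans (portB_toList text).symm)
  exact String.toList_inj.mp h
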